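-- pv_equiv track=rewrite | github.com/yaxsomo/dopynion-equipe-3 | src/app/routers/game.py | _terminal_capacity
-- ===== SOURCE A (Python) =====
-- TERMINAL_ACTIONS = {"smithy", "woodcutter"}  # simple terminals present in this set
--
-- def _terminal_capacity(state_counts: dict[str, int]) -> int:
--     """Approximate how many more terminal actions we can support without collision."""
--     terminals = sum(state_counts.get(t, 0) for t in TERMINAL_ACTIONS)
--     # sources of +Actions (very rough model)
--     plus_actions = (
--         state_counts.get("village", 0) * 2
--         + state_counts.get("market", 0) * 1
--         + state_counts.get("festival", 0) * 2
--         + state_counts.get("laboratory", 0) * 1  # lab is non-terminal (+1 action)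
--     )
--     # one native action per turn
--     return 1 + plus_actions - terminals
-- ===== SOURCE B (Python) =====
-- # B: classify each card once into one of three buckets (double-action givers,
-- # single-action givers, terminals) with three counters in a single pass, then
-- # combine the bucket totals arithmetically at the end.
-- DOUBLE_ACTION = {"village", "festival"}
-- SINGLE_ACTION = {"market", "laboratory"}
-- TERMINAL = {"smithy", "woodcutter"}
--
-- def _terminal_capacity(state_counts: dict[str, int]) -> int:
--     doubles = singles = terms = 0
--     for name, count in state_counts.items():
--         if name in DOUBLE_ACTION:
--             doubles += count
--         elif name in SINGLE_ACTION:
--             singles += count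
--         elif name in TERMINAL:
--             terms += count
--     return 1 + 2 * doubles + singles - terms
-- ===== Notes on version B (the rewrite author's own statement) =====
-- stated objective: alternative
-- what changed: Instead of A's six fixed per-name dict lookups summed with literal weights, B makes one classification pass over the input, sorting each card into one of three buckets (double-action, single-action, terminal) via set membership with three running counters, and combines the bucket totals arithmetically at the end.
import Mathlib
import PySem

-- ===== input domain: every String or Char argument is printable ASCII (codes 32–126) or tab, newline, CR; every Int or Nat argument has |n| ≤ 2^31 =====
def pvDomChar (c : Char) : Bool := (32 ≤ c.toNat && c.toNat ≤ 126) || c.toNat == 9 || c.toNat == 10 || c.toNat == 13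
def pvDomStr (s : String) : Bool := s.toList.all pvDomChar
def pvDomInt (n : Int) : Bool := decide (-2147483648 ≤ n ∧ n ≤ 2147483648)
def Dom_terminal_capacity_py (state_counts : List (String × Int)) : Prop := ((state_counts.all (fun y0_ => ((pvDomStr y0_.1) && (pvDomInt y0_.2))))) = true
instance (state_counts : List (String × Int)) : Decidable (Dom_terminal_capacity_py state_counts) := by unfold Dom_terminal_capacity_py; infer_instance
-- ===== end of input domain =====

-- B replaces A's six fixed per-name lookups with one classification pass over the input
-- (three bucket counters, combined at the end); same result, alternative decomposition.

-- ===== PORT A =====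
def terminal_capacity_py (state_counts : List (String × Int)) : Int :=
  let d : PySem.Dict String Int := PySem.Dict.mk state_counts
  -- sum over TERMINAL_ACTIONS = {"smithy", "woodcutter"} (set iteration order is irrelevant to the sum)
  let terminals : Int := d.getD "smithy" 0 + d.getD "woodcutter" 0
  let plus_actions : Int :=
    d.getD "village" 0 * 2
    + d.getD "market" 0 * 1
    + d.getD "festival" 0 * 2
    + d.getD "laboratory" 0 * 1
  1 + plus_actions - terminals

-- ===== PORT B =====
-- the three classification sets of Source B (sets of distinct strings = List String)
def pvDoubleAction : List String := ["village", "festival"]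
def pvSingleAction : List String := ["market", "laboratory"]
def pvTerminal : List String := ["smithy", "woodcutter"]

-- the loop body of Source B: classify one (name, count) pair into the three counters
def pvClassify (a : Int × Int × Int) (p : String × Int) : Int × Int × Int :=
  if pvDoubleAction.contains p.1 then (a.1 + p.2, a.2.1, a.2.2)
  else if pvSingleAction.contains p.1 then (a.1, a.2.1 + p.2, a.2.2)
  else if pvTerminal.contains p.1 then (a.1, a.2.1, a.2.2 + p.2)
  else a

def terminal_capacity_py_alt (state_counts : List (String × Int)) : Int :=
  let acc := state_counts.foldl pvClassify (0, 0, 0)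
  1 + 2 * acc.1 + acc.2.1 - acc.2.2

-- ===== PRECONDITION & SPEC =====
-- Pre_ excludes association lists with duplicate keys: they represent no Python dict
-- (dict keys are unique), so nothing is claimed about them.
def Pre_terminal_capacity_py (state_counts : List (String × Int)) : Prop :=
  (state_counts.map Prod.fst).Nodup
instance (state_counts : List (String × Int)) : Decidable (Pre_terminal_capacity_py state_counts) := by
  unfold Pre_terminal_capacity_py; infer_instance

def pvWitness_terminal_capacity_py : (List (String × Int)) :=
  [("village", 2), ("smithy", 3), ("gold", 5)]

def Spec_terminal_capacity_py (state_counts : List (String × Int)) (out : Int) : Prop := out = terminal_capacity_py_alt state_counts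
instance (state_counts : List (String × Int)) (out : Int) : Decidable (Spec_terminal_capacity_py state_counts out) := by unfold Spec_terminal_capacity_py; infer_instance

-- ===== CLAIM (what is proved, stated in full; the proofs are below) =====
def Claim_equal_terminal_capacity_py : Prop := ∀ (state_counts : List (String × Int)), Dom_terminal_capacity_py state_counts → Pre_terminal_capacity_py state_counts → Spec_terminal_capacity_py state_counts (terminal_capacity_py state_counts)

-- ===== LEMMAS AND PROOFS =====

-- first-match lookup peels one pair off the front
theorem pv_getD_cons (k x : String) (v : Int) (l : List (String × Int)) :
    (PySem.Dict.mk ((k, v) :: l)).getD x 0 = if k = x then v else (PySem.Dict.mk l).getD x 0 := by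
  rw [PySem.Dict.getD_eq_get?_getD, PySem.Dict.get?_mk_cons]
  by_cases h : k = x <;>
    simp [h, PySem.Dict.getD_eq_get?_getD]

-- a key absent from the list looks up to the default
theorem pv_getD_not_mem (x : String) (l : List (String × Int)) (h : x ∉ l.map Prod.fst) :
    (PySem.Dict.mk l).getD x 0 = 0 := by
  induction l with
  | nil => simp [PySem.Dict.getD_eq_get?_getD, PySem.Dict.get?]
  | cons p t ih =>
    obtain ⟨k, v⟩ := p
    rw [pv_getD_cons]
    simp only [List.map_cons, List.mem_cons] at h
    push Not at h
    rw [if_neg (fun he => h.1 he.symm)]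
    exact ih h.2

-- the classification fold is componentwise additive in its accumulator
theorem pv_fold_shift (l : List (String × Int)) (a : Int × Int × Int) :
    l.foldl pvClassify a
      = (a.1 + (l.foldl pvClassify (0, 0, 0)).1,
         a.2.1 + (l.foldl pvClassify (0, 0, 0)).2.1,
         a.2.2 + (l.foldl pvClassify (0, 0, 0)).2.2) := by
  induction l generalizing a with
  | nil => simp
  | cons p t ih =>
    simp only [List.foldl_cons]
    rw [ih (pvClassify a p), ih (pvClassify (0, 0, 0) p)]
    unfold pvClassify
    split_ifs <;> simp <;> ring_nf

-- B's value on a cons: head contribution plus B on the tail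
theorem pv_alt_cons (k : String) (v : Int) (t : List (String × Int)) :
    terminal_capacity_py_alt ((k, v) :: t)
      = (2 * (pvClassify (0, 0, 0) (k, v)).1
         + (pvClassify (0, 0, 0) (k, v)).2.1
         - (pvClassify (0, 0, 0) (k, v)).2.2)
        + terminal_capacity_py_alt t := by
  simp only [terminal_capacity_py_alt, List.foldl_cons]
  rw [pv_fold_shift t (pvClassify (0, 0, 0) (k, v))]
  ring

theorem pv_main (l : List (String × Int)) (h : (l.map Prod.fst).Nodup) :
    terminal_capacity_py l = terminal_capacity_py_alt l := by
  induction l with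
  | nil => decide
  | cons p t ih =>
    obtain ⟨k, v⟩ := p
    simp only [List.map_cons, List.nodup_cons] at h
    have ht := ih h.2
    rw [pv_alt_cons, ← ht]
    simp only [terminal_capacity_py]
    rw [pv_getD_cons, pv_getD_cons, pv_getD_cons, pv_getD_cons, pv_getD_cons, pv_getD_cons]
    by_cases h1 : k = "smithy"
    · subst h1; rw [pv_getD_not_mem _ t h.1]
      simp [pvClassify, pvDoubleAction, pvSingleAction, pvTerminal]; ring
    by_cases h2 : k = "woodcutter"
    · subst h2; rw [pv_getD_not_mem _ t h.1]
      simp [pvClassify, pvDoubleAction, pvSingleAction, pvTerminal]; ring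
    by_cases h3 : k = "village"
    · subst h3; rw [pv_getD_not_mem _ t h.1]
      simp [pvClassify, pvDoubleAction, pvSingleAction, pvTerminal]; ring
    by_cases h4 : k = "market"
    · subst h4; rw [pv_getD_not_mem _ t h.1]
      simp [pvClassify, pvDoubleAction, pvSingleAction, pvTerminal]; ring
    by_cases h5 : k = "festival"
    · subst h5; rw [pv_getD_not_mem _ t h.1]
      simp [pvClassify, pvDoubleAction, pvSingleAction, pvTerminal]; ring
    by_cases h6 : k = "laboratory"
    · subst h6; rw [pv_getD_not_mem _ t h.1]
      simp [pvClassify, pvDoubleAction, pvSingleAction, pvTerminal]; ring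
    · have hc : pvClassify (0, 0, 0) (k, v) = (0, 0, 0) := by
        simp [pvClassify, pvDoubleAction, pvSingleAction, pvTerminal, h1, h2, h3, h4, h5, h6]
      rw [if_neg h1, if_neg h2, if_neg h3, if_neg h4, if_neg h5, if_neg h6, hc]
      ring

-- ===== VERDICT (by name: the statement is the Claim_ definition above) =====
theorem terminal_capacity_py_spec : Claim_equal_terminal_capacity_py := by
  intro l _ hpre
  exact pv_main l hpre
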